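-- pv_equiv track=rewrite | github.com/Cloufield/formatbook | scripts/sync_auto_from_raw.py | _merge_format_dict
-- ===== SOURCE A (Python) =====
-- def _merge_format_dict(raw: dict, target: dict, assumption_keys: frozenset[str]) -> dict:
--     merged = dict(raw)
--     for k in sorted(assumption_keys):
--         if k in target:
--             merged[k] = target[k]
--     for k, v in target.items():
--         if k not in merged:
--             merged[k] = v
--     return merged
-- ===== SOURCE B (Python) =====
-- def _merge_format_dict(raw: dict, target: dict, assumption_keys: frozenset[str]) -> dict:
--     # key-order / value separation: compute the final key sequence first, then
--     # map one pointwise value function over it (no accumulating-dict mutation)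
--     fresh = [k for k in target if k not in raw]
--     assumed = sorted(k for k in fresh if k in assumption_keys)
--     plain = [k for k in fresh if k not in assumption_keys]
--
--     def value(k):
--         if k in target and (k in assumption_keys or k not in raw):
--             return target[k]
--         return raw[k]
--
--     return {k: value(k) for k in (*raw, *assumed, *plain)}
-- ===== Notes on version B (the rewrite author's own statement) =====
-- stated objective: alternative
-- what changed: B never mutates an accumulating dict: it separates key order from values, first computing the final key sequence (raw keys, then the sorted fresh assumption keys, then the remaining fresh target keys) and then mapping a single pointwise value function over that sequence, instead of A's copy-then-two-override-loops.
import Mathlib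
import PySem

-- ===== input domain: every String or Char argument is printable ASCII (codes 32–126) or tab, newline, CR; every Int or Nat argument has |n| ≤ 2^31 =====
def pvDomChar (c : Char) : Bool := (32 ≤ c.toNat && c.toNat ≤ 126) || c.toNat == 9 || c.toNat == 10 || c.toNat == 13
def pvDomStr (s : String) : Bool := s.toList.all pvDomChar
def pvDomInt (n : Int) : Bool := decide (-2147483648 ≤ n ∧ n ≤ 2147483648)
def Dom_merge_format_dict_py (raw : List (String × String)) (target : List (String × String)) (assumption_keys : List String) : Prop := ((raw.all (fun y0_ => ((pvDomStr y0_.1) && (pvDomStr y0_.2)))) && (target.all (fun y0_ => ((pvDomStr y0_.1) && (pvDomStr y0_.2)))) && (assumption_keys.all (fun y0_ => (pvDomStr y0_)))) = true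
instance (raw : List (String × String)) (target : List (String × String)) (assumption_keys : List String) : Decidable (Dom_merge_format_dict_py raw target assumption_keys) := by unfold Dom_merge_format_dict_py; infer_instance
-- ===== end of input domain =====

-- B separates key order from values: it computes the final key sequence (raw keys, sorted
-- fresh assumption keys, remaining fresh target keys) and maps one pointwise value function
-- over it, instead of A's copy-then-mutate loops; objective: alternative, same cost.

-- ===== PORT A =====
-- sorted(assumption_keys) compares Python strings by code points = Lean's lexicographic
-- order on toList (exact on the ASCII domain)
def merge_format_dict_py (raw : List (String × String)) (target : List (String × String)) (assumption_keys : List String) : List (String × String) :=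
  let t := PySem.Dict.ofList target
  let merged0 := PySem.Dict.ofList raw
  let merged1 := List.foldl
      (fun m k => if t.contains k then m.insert k (t.getD k "") else m)
      merged0 (PySem.List.sorted (PySem.Set.ofList assumption_keys) (fun k => k.toList))
  let merged2 := List.foldl
      (fun m kv => if m.contains kv.1 then m else m.insert kv.1 kv.2) merged1 t.items
  merged2.items

-- ===== PORT B =====
def merge_format_dict_py_alt (raw : List (String × String)) (target : List (String × String)) (assumption_keys : List String) : List (String × String) :=
  let t := PySem.Dict.ofList target
  let r := PySem.Dict.ofList raw
  let fresh := t.keys.filter (fun k => !(r.contains k))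
  let assumed := PySem.List.sorted (fresh.filter (fun k => assumption_keys.contains k)) (fun k => k.toList)
  let plain := fresh.filter (fun k => !(assumption_keys.contains k))
  let value := fun k =>
    if t.contains k && (assumption_keys.contains k || !(r.contains k)) then t.getD k "" else r.getD k ""
  (PySem.Dict.ofList ((r.keys ++ assumed ++ plain).map (fun k => (k, value k)))).items

-- ===== PRECONDITION & SPEC =====
def Spec_merge_format_dict_py (raw : List (String × String)) (target : List (String × String)) (assumption_keys : List String) (out : List (String × String)) : Prop := out = merge_format_dict_py_alt raw target assumption_keys
instance (raw : List (String × String)) (target : List (String × String)) (assumption_keys : List String) (out : List (String × String)) : Decidable (Spec_merge_format_dict_py raw target assumption_keys out) := by unfold Spec_merge_format_dict_py; infer_instance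

-- ===== CLAIM (what is proved, stated in full; the proofs are below) =====
def Claim_equal_merge_format_dict_py : Prop := ∀ (raw : List (String × String)) (target : List (String × String)) (assumption_keys : List String), Dom_merge_format_dict_py raw target assumption_keys → Spec_merge_format_dict_py raw target assumption_keys (merge_format_dict_py raw target assumption_keys)

-- ===== LEMMAS AND PROOFS =====

-- a pair list with distinct keys reassembles into a Dict with exactly those items
theorem pv_ofList_items {κ ν : Type} [BEq κ] [LawfulBEq κ] (l : List (κ × ν))
    (h : (l.map Prod.fst).Nodup) : (PySem.Dict.ofList l).items = l := by
  have := PySem.Dict.items_foldl_insert_fresh l Prod.fst Prod.snd PySem.Dict.empty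
    (by intro a _; simp [PySem.Dict.contains_empty]) h
  simpa using this

-- the two elaborations of sorted-by-code-points on String coincide (instances are subsingletons)
theorem pv_sorted_inst (xs : List String) :
    @PySem.List.sorted String (List Char) List.instLT (fun a b => a.decidableLT b) xs (fun k => k.toList) false
    = @PySem.List.sorted String (List Char) List.instLinearOrder.toLT LinearOrder.toDecidableLT xs (fun k => k.toList) false := by
  congr 1

-- phase 1 of A: inserting a Nodup list of keys with key-determined values
theorem pv_phase1 {κ ν : Type} [BEq κ] [LawfulBEq κ] (f : κ → ν) :
    ∀ (l : List κ) (d : PySem.Dict κ ν), l.Nodup → d.keys.Nodup →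
    (List.foldl (fun m k => m.insert k (f k)) d l).items =
      d.items.map (fun p => if l.contains p.1 then (p.1, f p.1) else p)
      ++ (l.filter (fun k => !(d.contains k))).map (fun k => (k, f k)) := by
  intro l
  induction l with
  | nil => intro d _ _; simp
  | cons k rest ih =>
    intro d hnd hk
    have hknotin : k ∉ rest := (List.nodup_cons.mp hnd).1
    have hrest : rest.Nodup := (List.nodup_cons.mp hnd).2
    simp only [List.foldl_cons, List.filter_cons]
    rw [ih (d.insert k (f k)) hrest (PySem.Dict.nodup_keys_insert _ _ _ hk)]
    by_cases hc : d.contains k = true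
    · rw [PySem.Dict.items_insert_of_contains _ _ hc]
      have hfilter : rest.filter (fun k' => !((d.insert k (f k)).contains k'))
          = rest.filter (fun k' => !(d.contains k')) := by
        apply List.filter_congr
        intro k' hk'
        rw [PySem.Dict.contains_insert]
        have : k' ≠ k := fun h => hknotin (h ▸ hk')
        simp [this]
      rw [hfilter]
      have hmap : (d.items.map (fun p => if (p.1 == k) = true then (k, f k) else p)).map
            (fun p => if rest.contains p.1 then (p.1, f p.1) else p)
          = d.items.map (fun p => if (k :: rest).contains p.1 then (p.1, f p.1) else p) := by
        rw [List.map_map]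
        apply List.map_congr_left
        intro p _
        by_cases hpk : p.1 = k
        · simp [Function.comp, hpk]
        · simp [Function.comp, hpk]
      rw [hmap]
      simp [hc]
    · rw [PySem.Dict.items_insert_of_not_contains _ _ (by simpa using hc)]
      have hfilter : rest.filter (fun k' => !((d.insert k (f k)).contains k'))
          = rest.filter (fun k' => !(d.contains k')) := by
        apply List.filter_congr
        intro k' hk'
        rw [PySem.Dict.contains_insert]
        have : k' ≠ k := fun h => hknotin (h ▸ hk')
        simp [this]
      rw [hfilter, List.map_append]
      have hkeysne : ∀ p ∈ d.items, p.1 ≠ k := by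
        intro p hp h
        have : p.1 ∈ d.keys := PySem.Dict.mem_keys_of_mem_items _ hp
        rw [h] at this
        exact hc ((PySem.Dict.contains_iff_mem_keys _ _).mpr this)
      have hmap : d.items.map (fun p => if rest.contains p.1 then (p.1, f p.1) else p)
          = d.items.map (fun p => if (k :: rest).contains p.1 then (p.1, f p.1) else p) := by
        apply List.map_congr_left
        intro p hp
        have hb : (p.1 == k) = false := by simpa using hkeysne p hp
        simp [hb]
      rw [hmap]
      have : rest.contains k ≠ true := by simpa using hknotin
      simp [hc, List.append_assoc]

-- phase 2 of A: the "if k not in merged" loop appends the fresh target items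
theorem pv_phase2 {κ ν : Type} [BEq κ] [LawfulBEq κ] :
    ∀ (l : List (κ × ν)) (d : PySem.Dict κ ν), (l.map Prod.fst).Nodup →
    (List.foldl (fun m kv => if m.contains kv.1 then m else m.insert kv.1 kv.2) d l).items =
      d.items ++ l.filter (fun kv => !(d.contains kv.1)) := by
  intro l
  induction l with
  | nil => intro d _; simp
  | cons kv rest ih =>
    intro d hnd
    have hmem : ∀ p ∈ rest, p.1 ≠ kv.1 := by
      intro p hp h
      have := (List.nodup_cons.mp hnd).1
      exact this (h ▸ List.mem_map_of_mem hp)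
    have hrest : (rest.map Prod.fst).Nodup := (List.nodup_cons.mp hnd).2
    simp only [List.foldl_cons, List.filter_cons]
    by_cases hc : d.contains kv.1 = true
    · rw [if_pos hc, ih d hrest]
      simp [hc]
    · rw [if_neg hc, ih (d.insert kv.1 kv.2) hrest]
      rw [PySem.Dict.items_insert_of_not_contains _ _ (by simpa using hc)]
      have hf : rest.filter (fun p => !((d.insert kv.1 kv.2).contains p.1))
          = rest.filter (fun p => !(d.contains p.1)) := by
        apply List.filter_congr
        intro p hp
        rw [PySem.Dict.contains_insert]
        simp [hmem p hp]
      rw [hf]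
      simp [hc]

-- ===== VERDICT (by name: the statement is the Claim_ definition above) =====
theorem merge_format_dict_py_spec : Claim_equal_merge_format_dict_py := by
  intro raw target ak _
  unfold Spec_merge_format_dict_py merge_format_dict_py merge_format_dict_py_alt
  set t := PySem.Dict.ofList target with ht
  set r := PySem.Dict.ofList raw with hr
  set S := PySem.List.sorted (PySem.Set.ofList ak) (fun k : String => k.toList) with hS
  simp only []
  -- basic facts
  have hSnd : S.Nodup := ((PySem.List.sorted_perm _ _ _).nodup_iff).mpr (PySem.Set.nodup_ofList ak)
  have hmemS : ∀ x, x ∈ S ↔ x ∈ ak := by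
    intro x
    rw [(PySem.List.sorted_perm _ _ _).mem_iff]
    exact PySem.Set.mem_ofList _ _
  have hrk : r.keys.Nodup := PySem.Dict.nodup_keys_ofList raw
  have htk : t.keys.Nodup := PySem.Dict.nodup_keys_ofList target
  have htitems : (t.items.map Prod.fst).Nodup := by simpa [PySem.Dict.keys] using htk
  have hritems : (r.items.map Prod.fst).Nodup := by simpa [PySem.Dict.keys] using hrk
  have hmemtk : ∀ x, x ∈ t.keys ↔ t.contains x = true := by
    intro x; rw [PySem.Dict.contains_iff_mem_keys]
  have hmemrk : ∀ x, x ∈ r.keys ↔ r.contains x = true := by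
    intro x; rw [PySem.Dict.contains_iff_mem_keys]
  -- phase 1 of A
  rw [PySem.List.foldl_if_eq_foldl_filter (p := fun k => t.contains k)
      (f := fun m k => m.insert k (t.getD k "")) S r]
  set S' := S.filter (fun k => t.contains k) with hS'
  have hS'nd : S'.Nodup := hSnd.filter _
  have hmemS' : ∀ x, x ∈ S' ↔ x ∈ ak ∧ t.contains x = true := by
    intro x; rw [hS', List.mem_filter, hmemS]
  set merged1 := List.foldl (fun m k => m.insert k (t.getD k "")) r S' with hm1
  have hcon : ∀ x, merged1.contains x = true ↔ x ∈ r.keys ∨ x ∈ S' := by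
    intro x
    rw [PySem.Dict.contains_iff_mem_keys, hm1,
      PySem.Dict.keys_foldl_insert S' (fun _ k => t.getD k "") r]
    exact PySem.Set.mem_update _ _ _
  -- phase 2 of A
  rw [pv_phase2 t.items merged1 htitems]
  rw [hm1, pv_phase1 (fun k => t.getD k "") S' r hS'nd hrk]
  -- B's pieces
  set fresh := t.keys.filter (fun k => !(r.contains k)) with hfresh
  set assumed := PySem.List.sorted (fresh.filter (fun k => ak.contains k)) (fun k : String => k.toList) with hassumed
  set plain := fresh.filter (fun k => !(ak.contains k)) with hplain
  set value := fun k =>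
    if t.contains k && (ak.contains k || !(r.contains k)) then t.getD k "" else r.getD k "" with hvalue
  -- the middle segment: A appends those keys of S' that are fresh, in S-order;
  -- B sorts the fresh assumption keys of target: the same Nodup set in the same strict order
  have hassumed_eq : assumed = S'.filter (fun k => !(r.contains k)) := by
    have hperm : (S'.filter (fun k => !(r.contains k))).Perm
        (fresh.filter (fun k => ak.contains k)) := by
      apply (List.perm_ext_iff_of_nodup (hS'nd.filter _) ((htk.filter _).filter _)).mpr
      intro x
      simp only [hS', List.mem_filter]
      rw [hmemS x]
      constructor
      · rintro ⟨⟨hak, hct⟩, hnr⟩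
        exact ⟨⟨(hmemtk x).mpr hct, hnr⟩, by simpa [List.contains_iff_mem] using hak⟩
      · rintro ⟨⟨hxt, hnr⟩, hak⟩
        exact ⟨⟨by simpa [List.contains_iff_mem] using hak, (hmemtk x).mp hxt⟩, hnr⟩
    have hpS : List.Pairwise (fun a b : String => a.toList ≤ b.toList) S := by
      rw [hS, pv_sorted_inst]
      exact PySem.List.sorted_pairwise _ _
    have hsub : (S'.filter (fun k => !(r.contains k))).Sublist S :=
      (List.filter_sublist (p := fun k => !(r.contains k))).trans
        (hS' ▸ List.filter_sublist (p := fun k => t.contains k))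
    have hle := List.Pairwise.sublist hsub hpS
    have hnd : (S'.filter (fun k => !(r.contains k))).Nodup := hS'nd.filter _
    have hlt : (S'.filter (fun k => !(r.contains k))).Pairwise
        (fun a b : String => a.toList < b.toList) :=
      (List.Pairwise.and hnd hle).imp (fun h => lt_of_le_of_ne h.2
        (fun hc => h.1 (String.toList_inj.mp hc)))
    rw [hassumed, pv_sorted_inst]
    exact PySem.List.sorted_eq_of_perm_of_pairwise_lt _ _ _ hperm hlt
  -- keys of the three segments are pairwise disjoint and individually Nodup
  have hmemassumed : ∀ x ∈ assumed, x ∈ ak ∧ t.contains x = true ∧ r.contains x = false := by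
    intro x hx
    rw [hassumed_eq, List.mem_filter] at hx
    rcases hx with ⟨hx, hnr⟩
    rcases (hmemS' x).mp hx with ⟨hak, hct⟩
    exact ⟨hak, hct, by simpa using hnr⟩
  have hmemplain : ∀ x ∈ plain, x ∉ ak ∧ t.contains x = true ∧ r.contains x = false := by
    intro x hx
    rw [hplain, List.mem_filter, hfresh, List.mem_filter, hmemtk] at hx
    rcases hx with ⟨⟨hct, hnr⟩, hnak⟩
    exact ⟨by simpa [List.contains_iff_mem] using hnak, hct, by simpa using hnr⟩
  have hnodup : (((r.keys ++ assumed ++ plain).map (fun k => (k, value k))).map Prod.fst).Nodup := by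
    rw [List.map_map]
    have : (Prod.fst ∘ fun k => (k, value k)) = id := rfl
    rw [this, List.map_id, List.append_assoc]
    apply List.Nodup.append hrk
    · apply List.Nodup.append (hassumed_eq ▸ hS'nd.filter _) ((htk.filter _).filter _)
      intro x hxa hxp
      exact (hmemplain x hxp).1 (hmemassumed x hxa).1
    · intro x hxr hrest
      have hxc : r.contains x = true := (hmemrk x).mp hxr
      rcases List.mem_append.mp hrest with hxa | hxp
      · rw [(hmemassumed x hxa).2.2] at hxc; exact Bool.false_ne_true hxc
      · rw [(hmemplain x hxp).2.2] at hxc; exact Bool.false_ne_true hxc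
  rw [pv_ofList_items _ hnodup]
  rw [List.map_append, List.map_append]
  -- segment 1: raw keys with overrides
  have e1 : r.items.map (fun p => if S'.contains p.1 then (p.1, t.getD p.1 "") else p)
      = r.keys.map (fun k => (k, value k)) := by
    simp only [PySem.Dict.keys, List.map_map]
    apply List.map_congr_left
    intro p hp
    have hrc : r.contains p.1 = true :=
      (PySem.Dict.contains_iff_mem_keys _ _).mpr (PySem.Dict.mem_keys_of_mem_items _ hp)
    have hget : r.getD p.1 "" = p.2 :=
      PySem.Dict.getD_of_mem_items r (show (p.1, p.2) ∈ r.items by simpa using hp) hrk ""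
    have hb : S'.contains p.1 = (ak.contains p.1 && t.contains p.1) := by
      rw [Bool.eq_iff_iff]
      simp [hmemS' p.1, List.contains_iff_mem, And.comm]
    rw [hvalue]
    by_cases hak : p.1 ∈ ak
    · by_cases hta : t.contains p.1 = true
      · have hs : p.1 ∈ S' := (hmemS' _).mpr ⟨hak, hta⟩
        simp [Function.comp, hs, hak, hta, hrc]
      · have hs : p.1 ∉ S' := fun h => hta ((hmemS' _).mp h).2
        have hta' : t.contains p.1 = false := by simpa using hta
        simp [Function.comp, hs, hak, hta', hrc, hget]
    · have hs : p.1 ∉ S' := fun h => hak ((hmemS' _).mp h).1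
      have hak' : ak.contains p.1 = false := by simpa [List.contains_iff_mem] using hak
      simp [Function.comp, hs, hak, hrc, hget]
  -- segment 2: fresh assumption keys
  have e2 : (S'.filter (fun k => !(r.contains k))).map (fun k => (k, t.getD k ""))
      = assumed.map (fun k => (k, value k)) := by
    rw [hassumed_eq]
    apply List.map_congr_left
    intro k hk
    rw [List.mem_filter] at hk
    rcases (hmemS' k).mp hk.1 with ⟨_, hct⟩
    have hrf : r.contains k = false := by simpa using hk.2
    rw [hvalue]
    simp [hct, hrf]
  -- segment 3: remaining fresh target keys
  have e3 : t.items.filter (fun kv => !(merged1.contains kv.1))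
      = plain.map (fun k => (k, value k)) := by
    have hcongr : t.items.filter (fun kv => !(merged1.contains kv.1))
        = t.items.filter (fun kv => !(r.contains kv.1) && !(ak.contains kv.1)) := by
      apply List.filter_congr
      intro kv hkv
      have htc : t.contains kv.1 = true :=
        (PySem.Dict.contains_iff_mem_keys _ _).mpr (PySem.Dict.mem_keys_of_mem_items _ hkv)
      have hb : merged1.contains kv.1 = (r.contains kv.1 || ak.contains kv.1) := by
        rw [Bool.eq_iff_iff]
        simp only [Bool.or_eq_true]
        rw [hcon kv.1, ← PySem.Dict.contains_iff_mem_keys]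
        constructor
        · rintro (h | h)
          · exact Or.inl h
          · exact Or.inr (by simpa [List.contains_iff_mem] using ((hmemS' kv.1).mp h).1)
        · rintro (h | h)
          · exact Or.inl h
          · exact Or.inr ((hmemS' kv.1).mpr ⟨by simpa [List.contains_iff_mem] using h, htc⟩)
      rw [hb]
      simp [Bool.not_or]
    rw [hcongr, PySem.Dict.items_eq_map_keys t htk "", List.filter_map]
    rw [hplain, hfresh, List.filter_filter]
    have hped : t.keys.filter
          ((fun kv : String × String => !(r.contains kv.1) && !(ak.contains kv.1)) ∘ fun k => (k, t.getD k ""))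
        = t.keys.filter (fun a => !(ak.contains a) && !(r.contains a)) := by
      apply List.filter_congr
      intro k _
      simp [Function.comp, Bool.and_comm]
    rw [hped]
    apply List.map_congr_left
    intro k hk
    rw [List.mem_filter] at hk
    have htc : t.contains k = true := (hmemtk k).mp hk.1
    have hcond := hk.2
    simp only [Bool.and_eq_true, Bool.not_eq_true'] at hcond
    rw [hvalue]
    simp [htc, hcond.2]
  rw [e1, e2, e3, List.append_assoc]
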